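-- pv_equiv track=rewrite | github.com/Idran/Pathfinder-Combat-Simulation | spell.py | get_quarter_circle_sweep_tilted
-- ===== SOURCE A (Python) =====
-- def get_quarter_circle_sweep_tilted(spell_rng,filled=False):
--
--     outer_point_set = []
--     outer_point_set_2 = []
--
--     square_count = spell_rng // 5
--
--     for y_mod in range(1,square_count + 1):
--         y = square_count - y_mod
--         diag = int((y_mod - 1) * 2 / 3)
--         point = [diag,y + diag]
--         outer_point_set.append(point)
--
--     for x1,y1 in outer_point_set:
--         outer_point_set_2.append([-x1 - 1,y1])
--
--     if filled:
--         for x1,y1 in outer_point_set: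
--             for y in range(x1,y1):
--                 if [x1,y] not in outer_point_set:
--                     outer_point_set.append([x1,y])
--
--         for x1,y1 in outer_point_set_2:
--             for y in range(-(x1 + 1),y1):
--                 if [x1,y] not in outer_point_set_2:
--                     outer_point_set_2.append([x1,y])
--
--     outer_point_set = outer_point_set + outer_point_set_2
--
--     outer_point_set.sort(key=lambda i:i[0])
--     outer_point_set.sort(key=lambda i:i[1], reverse=True)
--
--     return outer_point_set
-- ===== SOURCE B (Python) =====
-- def get_quarter_circle_sweep_tilted(spell_rng, filled=False):
--     square_count = spell_rng // 5
--     pts = set()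
--     for y_mod in range(1, square_count + 1):
--         x0 = (y_mod - 1) * 2 // 3
--         y1 = (square_count - y_mod) + x0
--         if filled:
--             for y in range(x0, y1 + 1):
--                 pts.add((x0, y))
--                 pts.add((-x0 - 1, y))
--         else:
--             pts.add((x0, y1))
--             pts.add((-x0 - 1, y1))
--     return [[x, y] for (x, y) in sorted(pts, key=lambda p: (-p[1], p[0]))]
-- ===== Notes on version B (the rewrite author's own statement) =====
-- stated objective: simpler
-- what changed: B computes each column's point span directly (single pass, deduplicating via a set of tuples) and sorts once by the tuple key (-y, x), replacing A's append-while-iterating list closure with linear 'not in' scans and its two stable sorts.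
import Mathlib
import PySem

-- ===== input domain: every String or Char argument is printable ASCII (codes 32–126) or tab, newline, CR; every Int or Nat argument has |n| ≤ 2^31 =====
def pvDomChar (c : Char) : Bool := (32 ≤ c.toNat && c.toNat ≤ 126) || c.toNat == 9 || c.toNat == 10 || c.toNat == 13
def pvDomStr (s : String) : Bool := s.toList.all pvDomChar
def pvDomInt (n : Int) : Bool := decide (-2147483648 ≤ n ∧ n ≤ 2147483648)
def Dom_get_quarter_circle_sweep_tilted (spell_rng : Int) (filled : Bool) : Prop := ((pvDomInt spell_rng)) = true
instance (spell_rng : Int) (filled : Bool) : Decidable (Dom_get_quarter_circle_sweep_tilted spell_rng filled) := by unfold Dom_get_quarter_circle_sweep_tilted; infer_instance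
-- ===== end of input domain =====

-- B builds the point set directly per column into a set of tuples and sorts once by the tuple key (-y, x),
-- replacing A's append-while-iterating closure and double stable sort with a plainer single-pass construction.


-- ===== PORT A =====

-- Python's `if [x1,y] not in lst: lst.append([x1,y])` inner loop (`for y in range(g(x1), y1)`),
-- run on the current list state.  In the first filled loop g is the identity, in the second
-- (whose range starts at `-(x1+1)`) g x1 = -(x1+1).
def pvA_fill_inner (g : Int → Int) (x1 y1 : Int) (lst : List (List Int)) : List (List Int) :=
  (PySem.List.pyRange (g x1) y1).foldl
    (fun acc y => if [x1, y] ∈ acc then acc else acc ++ [[x1, y]]) lst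

-- Python's `for x1,y1 in lst:` over a list that is appended to WHILE being iterated: index-based
-- walk of the live list.  The fuel argument only makes the recursion total; it is chosen large
-- enough at the call site (proved below), so it never runs out where Python terminates.
-- Elements are always two-element lists here; other shapes (Python would raise on unpacking) stop the loop.
def pvA_fill_loop (g : Int → Int) : Nat → Nat → List (List Int) → List (List Int)
  | 0, _, lst => lst
  | fuel + 1, i, lst =>
    match lst[i]? with
    | some (x1 :: y1 :: []) => pvA_fill_loop g fuel (i + 1) (pvA_fill_inner g x1 y1 lst)
    | some _ => lst
    | none => lst

def get_quarter_circle_sweep_tilted (spell_rng : Int) (filled : Bool) : List (List Int) :=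
  let square_count := PySem.Int.floordiv spell_rng 5
  -- first loop: build the outer diagonal points
  let outer_point_set :=
    (PySem.List.pyRange 1 (square_count + 1)).foldl
      (fun acc y_mod =>
        let y := square_count - y_mod
        let diag := PySem.Int.truncdiv ((y_mod - 1) * 2) 3   -- int((y_mod-1)*2/3): exact for these magnitudes
        acc ++ [[diag, y + diag]]) []
  -- second loop: mirror points (elements are always two-element lists)
  let outer_point_set_2 :=
    outer_point_set.foldl
      (fun acc p =>
        match p with
        | x1 :: y1 :: [] => acc ++ [[-x1 - 1, y1]]
        | _ => acc) []
  let outer_point_set' :=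
    if filled then
      pvA_fill_loop (fun x1 => x1)
        (outer_point_set.length * (square_count.toNat + 1) + 1) 0 outer_point_set
    else outer_point_set
  let outer_point_set_2' :=
    if filled then
      pvA_fill_loop (fun x1 => -(x1 + 1))
        (outer_point_set_2.length * (square_count.toNat + 1) + 1) 0 outer_point_set_2
    else outer_point_set_2
  let combined := outer_point_set' ++ outer_point_set_2'
  -- the two stable sorts; i[0]/i[1] never raise (elements are two-element lists)
  let s1 := PySem.List.sorted combined (fun i => PySem.List.pyGetD i 0 0) false
  PySem.List.sorted s1 (fun i => PySem.List.pyGetD i 1 0) true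

-- ===== PORT B =====

def get_quarter_circle_sweep_tilted_alt (spell_rng : Int) (filled : Bool) : List (List Int) :=
  let square_count := PySem.Int.floordiv spell_rng 5
  let pts : PySem.Set (Int × Int) :=
    (PySem.List.pyRange 1 (square_count + 1)).foldl
      (fun s y_mod =>
        let x0 := PySem.Int.floordiv ((y_mod - 1) * 2) 3
        let y1 := (square_count - y_mod) + x0
        if filled then
          (PySem.List.pyRange x0 (y1 + 1)).foldl
            (fun s y => (s.add (x0, y)).add (-x0 - 1, y)) s
        else
          (s.add (x0, y1)).add (-x0 - 1, y1))
      (PySem.Set.ofList [])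
  (PySem.List.sorted2 pts (fun p => -p.2) (fun p => p.1) false).map (fun p => [p.1, p.2])

-- ===== PRECONDITION & SPEC =====
def Spec_get_quarter_circle_sweep_tilted (spell_rng : Int) (filled : Bool) (out : List (List Int)) : Prop := out = get_quarter_circle_sweep_tilted_alt spell_rng filled
instance (spell_rng : Int) (filled : Bool) (out : List (List Int)) : Decidable (Spec_get_quarter_circle_sweep_tilted spell_rng filled out) := by unfold Spec_get_quarter_circle_sweep_tilted; infer_instance

-- ===== CLAIM (what is proved, stated in full; the proofs are below) =====
def Claim_equal_get_quarter_circle_sweep_tilted : Prop := ∀ (spell_rng : Int) (filled : Bool), Dom_get_quarter_circle_sweep_tilted spell_rng filled → Spec_get_quarter_circle_sweep_tilted spell_rng filled (get_quarter_circle_sweep_tilted spell_rng filled)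

-- ===== LEMMAS AND PROOFS =====

-- ---- arithmetic / range basics ----

def pvD (k : Int) : Int := PySem.Int.truncdiv ((k - 1) * 2) 3
def pvY (sc k : Int) : Int := sc - k + pvD k

theorem pvD_eq {k : Int} (hk : 1 ≤ k) : pvD k = (k - 1) * 2 / 3 := by
  unfold pvD PySem.Int.truncdiv
  exact Int.tdiv_eq_ediv_of_nonneg (by omega)

theorem pvD_floordiv {k : Int} (hk : 1 ≤ k) :
    PySem.Int.floordiv ((k - 1) * 2) 3 = pvD k := by
  rw [pvD_eq hk, PySem.Int.floordiv_eq_ediv_of_pos (by norm_num)]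

theorem pvD_bounds {k : Int} (hk : 1 ≤ k) : 0 ≤ pvD k ∧ pvD k ≤ k - 1 := by
  rw [pvD_eq hk]; omega

theorem pv_pyRange_nodup (a b : Int) : (PySem.List.pyRange a b).Nodup := by
  rw [PySem.List.pyRange_of_pos a b (by norm_num : (0:Int) < 1)]
  refine List.Nodup.map ?_ List.nodup_range
  intro x y hxy
  simpa using hxy

theorem pv_pyRange_len (a b : Int) : (PySem.List.pyRange a b).length = (b - a).toNat := by
  rw [PySem.List.pyRange_of_pos a b (by norm_num : (0:Int) < 1)]
  simp only [List.length_map, List.length_range]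
  split_ifs with h <;> omega

-- ---- the explicit outer point lists ----

def pvL1 (sc : Int) : List (List Int) :=
  (PySem.List.pyRange 1 (sc + 1)).map (fun k => [pvD k, pvY sc k])
def pvL2 (sc : Int) : List (List Int) :=
  (PySem.List.pyRange 1 (sc + 1)).map (fun k => [-pvD k - 1, pvY sc k])

def pvCond (sc : Int) (filled : Bool) (k y : Int) : Prop :=
  1 ≤ k ∧ k ≤ sc ∧ (filled = true → pvD k ≤ y ∧ y ≤ pvY sc k) ∧
    (filled = false → y = pvY sc k)

theorem pv_mem_L1 {sc : Int} {q : List Int} :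
    q ∈ pvL1 sc ↔ ∃ k, 1 ≤ k ∧ k ≤ sc ∧ q = [pvD k, pvY sc k] := by
  unfold pvL1
  simp only [List.mem_map, PySem.List.mem_pyRange_one]
  constructor
  · rintro ⟨k, ⟨h1, h2⟩, rfl⟩; exact ⟨k, h1, by omega, rfl⟩
  · rintro ⟨k, h1, h2, rfl⟩; exact ⟨k, ⟨h1, by omega⟩, rfl⟩

theorem pv_mem_L2 {sc : Int} {q : List Int} :
    q ∈ pvL2 sc ↔ ∃ k, 1 ≤ k ∧ k ≤ sc ∧ q = [-pvD k - 1, pvY sc k] := by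
  unfold pvL2
  simp only [List.mem_map, PySem.List.mem_pyRange_one]
  constructor
  · rintro ⟨k, ⟨h1, h2⟩, rfl⟩; exact ⟨k, h1, by omega, rfl⟩
  · rintro ⟨k, h1, h2, rfl⟩; exact ⟨k, ⟨h1, by omega⟩, rfl⟩

theorem pv_L1_nodup (sc : Int) : (pvL1 sc).Nodup := by
  refine List.Nodup.map_on ?_ (pv_pyRange_nodup 1 (sc + 1))
  intro x hx y hy hxy
  simp only [List.cons.injEq, and_true] at hxy
  unfold pvY at hxy
  omega

theorem pv_L2_nodup (sc : Int) : (pvL2 sc).Nodup := by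
  refine List.Nodup.map_on ?_ (pv_pyRange_nodup 1 (sc + 1))
  intro x hx y hy hxy
  simp only [List.cons.injEq, and_true] at hxy
  unfold pvY at hxy
  omega

-- ---- closed forms of A's two building loops ----

theorem pv_loopA1 (sc : Int) :
    (PySem.List.pyRange 1 (sc + 1)).foldl
      (fun acc y_mod =>
        acc ++ [[PySem.Int.truncdiv ((y_mod - 1) * 2) 3,
                 (sc - y_mod) + PySem.Int.truncdiv ((y_mod - 1) * 2) 3]]) []
      = pvL1 sc := by
  have := PySem.List.foldl_append_singleton_eq_map
    (fun k => [pvD k, pvY sc k]) (PySem.List.pyRange 1 (sc + 1)) []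
  simpa [pvD, pvY] using this

theorem pv_loopA2 (sc : Int) :
    (pvL1 sc).foldl
      (fun acc p =>
        match p with
        | x1 :: y1 :: [] => acc ++ [[-x1 - 1, y1]]
        | _ => acc) []
      = pvL2 sc := by
  unfold pvL1 pvL2
  induction (PySem.List.pyRange 1 (sc + 1)) using List.reverseRecOn with
  | nil => rfl
  | append_singleton ks k ih =>
    simp only [List.map_append, List.foldl_append, List.map_cons, List.map_nil, List.foldl_cons,
      List.foldl_nil, ih]

-- ---- generic facts about the guarded-append inner loop ----

theorem pv_gfold_prefix (x1 : Int) (ys : List Int) :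
    ∀ acc : List (List Int), acc <+:
      ys.foldl (fun acc y => if [x1, y] ∈ acc then acc else acc ++ [[x1, y]]) acc := by
  induction ys with
  | nil => intro acc; exact List.prefix_rfl
  | cons y ys ih =>
    intro acc
    simp only [List.foldl_cons]
    refine List.IsPrefix.trans ?_ (ih _)
    split_ifs with h
    · exact List.prefix_rfl
    · exact ⟨[[x1, y]], rfl⟩

theorem pv_gfold_mem (x1 : Int) (ys : List Int) :
    ∀ acc q, (q ∈ ys.foldl (fun acc y => if [x1, y] ∈ acc then acc else acc ++ [[x1, y]]) acc
      ↔ q ∈ acc ∨ ∃ y ∈ ys, q = [x1, y]) := by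
  induction ys with
  | nil => simp
  | cons y ys ih =>
    intro acc q
    simp only [List.foldl_cons, ih, List.mem_cons]
    split_ifs with h
    · constructor
      · rintro (hq | ⟨y', hy', rfl⟩)
        · exact Or.inl hq
        · exact Or.inr ⟨y', Or.inr hy', rfl⟩
      · rintro (hq | ⟨y', rfl | hy', rfl⟩)
        · exact Or.inl hq
        · exact Or.inl h
        · exact Or.inr ⟨y', hy', rfl⟩
    · simp only [List.mem_append, List.mem_singleton]
      constructor
      · rintro ((hq | hq) | ⟨y', hy', rfl⟩)
        · exact Or.inl hq
        · exact Or.inr ⟨y, Or.inl rfl, hq⟩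
        · exact Or.inr ⟨y', Or.inr hy', rfl⟩
      · rintro (hq | ⟨y', rfl | hy', rfl⟩)
        · exact Or.inl (Or.inl hq)
        · exact Or.inl (Or.inr rfl)
        · exact Or.inr ⟨y', hy', rfl⟩

theorem pv_gfold_nodup (x1 : Int) (ys : List Int) :
    ∀ acc : List (List Int), acc.Nodup →
      (ys.foldl (fun acc y => if [x1, y] ∈ acc then acc else acc ++ [[x1, y]]) acc).Nodup := by
  induction ys with
  | nil => intro acc h; exact h
  | cons y ys ih =>
    intro acc h
    simp only [List.foldl_cons]
    refine ih _ ?_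
    split_ifs with hmem
    · exact h
    · rw [List.nodup_append]
      refine ⟨h, List.nodup_singleton _, ?_⟩
      intro a ha b hb
      rw [List.mem_singleton] at hb
      subst hb
      exact fun he => hmem (he ▸ ha)

theorem pv_inner_prefix (g : Int → Int) (x1 y1 : Int) (lst : List (List Int)) :
    lst <+: pvA_fill_inner g x1 y1 lst :=
  pv_gfold_prefix x1 _ lst

theorem pv_inner_mem (g : Int → Int) (x1 y1 : Int) (lst : List (List Int)) (q : List Int) :
    q ∈ pvA_fill_inner g x1 y1 lst ↔ q ∈ lst ∨ ∃ y, g x1 ≤ y ∧ y < y1 ∧ q = [x1, y] := by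
  unfold pvA_fill_inner
  rw [pv_gfold_mem]
  simp only [PySem.List.mem_pyRange_one]
  constructor
  · rintro (h | ⟨y, ⟨h1, h2⟩, rfl⟩)
    · exact Or.inl h
    · exact Or.inr ⟨y, h1, h2, rfl⟩
  · rintro (h | ⟨y, h1, h2, rfl⟩)
    · exact Or.inl h
    · exact Or.inr ⟨y, ⟨h1, h2⟩, rfl⟩

theorem pv_inner_nodup (g : Int → Int) (x1 y1 : Int) (lst : List (List Int)) (h : lst.Nodup) :
    (pvA_fill_inner g x1 y1 lst).Nodup :=
  pv_gfold_nodup x1 _ lst h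

-- ---- the fill-loop closure ----

def pvCg (g : Int → Int) (L0 : List (List Int)) (q : List Int) : Prop :=
  ∃ x y0 y, [x, y0] ∈ L0 ∧ (y = y0 ∨ (g x ≤ y ∧ y < y0)) ∧ q = [x, y]

def pvCL (g : Int → Int) (L0 : List (List Int)) : List (List Int) :=
  L0.flatMap (fun p =>
    match p with
    | x :: y0 :: [] => [x, y0] :: (PySem.List.pyRange (g x) y0).map (fun y => [x, y])
    | _ => [])

theorem pv_mem_CL {g : Int → Int} {L0 : List (List Int)} {q : List Int}
    (h : pvCg g L0 q) : q ∈ pvCL g L0 := by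
  obtain ⟨x, y0, y, hmem, hy, rfl⟩ := h
  unfold pvCL
  rw [List.mem_flatMap]
  refine ⟨[x, y0], hmem, ?_⟩
  simp only [List.mem_cons, List.mem_map, PySem.List.mem_pyRange_one]
  rcases hy with rfl | ⟨h1, h2⟩
  · exact Or.inl rfl
  · exact Or.inr ⟨y, ⟨h1, h2⟩, rfl⟩

def pvProcessed (g : Int → Int) (q : List Int) (lst : List (List Int)) : Prop :=
  ∀ x1 y1, q = [x1, y1] → ∀ y, g x1 ≤ y → y < y1 → [x1, y] ∈ lst

def pvINV (g : Int → Int) (L0 : List (List Int)) (i : Nat) (lst : List (List Int)) : Prop :=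
  lst.Nodup ∧ (∀ q ∈ lst, pvCg g L0 q) ∧ (∀ p ∈ L0, p ∈ lst) ∧ i ≤ lst.length ∧
  (∀ j (hj : j < lst.length), j < i → pvProcessed g lst[j] lst)

theorem pv_fill_spec (g : Int → Int) (L0 : List (List Int)) :
    ∀ fuel i lst, pvINV g L0 i lst → (pvCL g L0).length + 1 ≤ fuel + i →
      (pvA_fill_loop g fuel i lst).Nodup ∧
      (∀ q, q ∈ pvA_fill_loop g fuel i lst ↔ pvCg g L0 q) := by
  intro fuel
  induction fuel with
  | zero =>
    intro i lst hinv hfuel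
    exfalso
    obtain ⟨hnd, hsub, hL0, hile, hproc⟩ := hinv
    have hsubCL : lst ⊆ pvCL g L0 := fun q hq => pv_mem_CL (hsub q hq)
    have := (List.subperm_of_subset hnd hsubCL).length_le
    omega
  | succ fuel ih =>
    intro i lst hinv hfuel
    obtain ⟨hnd, hsub, hL0, hile, hproc⟩ := hinv
    rcases hq : lst[i]? with _ | q
    · -- index past the end: the loop is finished, lst is saturated
      have hlen : lst.length ≤ i := by
        by_contra hcon
        rw [List.getElem?_eq_getElem (by omega)] at hq
        cases hq
      have hloop : pvA_fill_loop g (fuel + 1) i lst = lst := by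
        simp [pvA_fill_loop, hq]
      rw [hloop]
      refine ⟨hnd, fun q => ⟨fun hqmem => hsub q hqmem, ?_⟩⟩
      rintro ⟨x, y0, y, hxy0, hy, rfl⟩
      rcases hy with rfl | ⟨h1, h2⟩
      · exact hL0 _ hxy0
      · have hx0 : [x, y0] ∈ lst := hL0 _ hxy0
        obtain ⟨j, hj, hget⟩ := List.getElem_of_mem hx0
        exact hproc j hj (lt_of_lt_of_le hj hlen) x y0 hget y h1 h2
    · -- process element i
      have hqmem : q ∈ lst := List.mem_of_getElem? hq
      obtain ⟨x, y0, yv, hmemL0, hyv, hqe⟩ := hsub q hqmem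
      subst hqe
      have hi : i < lst.length := (List.getElem?_eq_some_iff.mp hq).1
      have hloop : pvA_fill_loop g (fuel + 1) i lst
          = pvA_fill_loop g fuel (i + 1) (pvA_fill_inner g x yv lst) := by
        simp [pvA_fill_loop, hq]
      rw [hloop]
      have hpre := pv_inner_prefix g x yv lst
      have hCgnew : ∀ q ∈ pvA_fill_inner g x yv lst, pvCg g L0 q := by
        intro q hq'
        rw [pv_inner_mem] at hq'
        rcases hq' with hq' | ⟨y, hy1, hy2, rfl⟩
        · exact hsub q hq'
        · refine ⟨x, y0, y, hmemL0, ?_, rfl⟩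
          rcases hyv with rfl | ⟨hv1, hv2⟩
          · exact Or.inr ⟨hy1, hy2⟩
          · exact Or.inr ⟨hy1, by omega⟩
      refine ih (i + 1) _ ⟨pv_inner_nodup g x yv lst hnd, hCgnew, ?_, ?_, ?_⟩ (by omega)
      · exact fun p hp => hpre.subset (hL0 p hp)
      · have := hpre.length_le
        omega
      · intro j hj hji
        have hjlst : j < lst.length := by omega
        have hgetj : (pvA_fill_inner g x yv lst)[j] = lst[j] := (hpre.getElem hjlst).symm
        rcases Nat.lt_or_ge j i with hji' | hji'
        · intro x1 y1 hx1 y hgy hyy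
          rw [hgetj] at hx1
          exact hpre.subset (hproc j hjlst hji' x1 y1 hx1 y hgy hyy)
        · have hji'' : j = i := by omega
          subst hji''
          intro x1 y1 hx1 y hgy hyy
          rw [hgetj] at hx1
          have hx1' : lst[j] = [x, yv] := by
            have := List.getElem?_eq_getElem hjlst
            rw [hq] at this
            exact Option.some.inj this.symm
          rw [hx1'] at hx1
          obtain ⟨rfl, rfl⟩ : x = x1 ∧ yv = y1 := by
            simpa using hx1
          rw [pv_inner_mem]
          exact Or.inr ⟨y, hgy, hyy, rfl⟩

-- length bound for the closure list
theorem pv_CL_len {g : Int → Int} {L0 : List (List Int)} {m : Nat}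
    (h : ∀ p ∈ L0, ∀ x y0, p = [x, y0] → (y0 - g x).toNat + 1 ≤ m) :
    (pvCL g L0).length ≤ L0.length * m := by
  induction L0 with
  | nil => simp [pvCL]
  | cons p L0 ih =>
    have hp := h p List.mem_cons_self
    have hrest : (pvCL g L0).length ≤ L0.length * m :=
      ih (fun p' hp' => h p' (List.mem_cons_of_mem _ hp'))
    unfold pvCL at *
    simp only [List.flatMap_cons, List.length_append, List.length_cons]
    have hlen : (match p with
      | x :: y0 :: [] => [x, y0] :: (PySem.List.pyRange (g x) y0).map (fun y => [x, y])
      | _ => ([] : List (List Int))).length ≤ m := by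
      match p with
      | [] => simpa using Nat.zero_le m
      | [x] => simpa using Nat.zero_le m
      | x :: y0 :: z :: t => simpa using Nat.zero_le m
      | [x, y0] =>
        have := hp x y0 rfl
        simp only [List.length_cons, List.length_map, pv_pyRange_len]
        omega
    calc _ ≤ m + L0.length * m := by omega
    _ = (L0.length + 1) * m := by ring
-- ---- the two filled closures of A ----

def pvF1 (sc : Int) : List (List Int) :=
  pvA_fill_loop (fun x1 => x1) ((pvL1 sc).length * (sc.toNat + 1) + 1) 0 (pvL1 sc)
def pvF2 (sc : Int) : List (List Int) :=
  pvA_fill_loop (fun x1 => -(x1 + 1)) ((pvL2 sc).length * (sc.toNat + 1) + 1) 0 (pvL2 sc)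

theorem pv_INV_zero (g : Int → Int) (L0 : List (List Int)) (hnd : L0.Nodup)
    (hC : ∀ q ∈ L0, pvCg g L0 q) : pvINV g L0 0 L0 :=
  ⟨hnd, hC, fun p hp => hp, Nat.zero_le _, fun j hj hji => absurd hji (Nat.not_lt_zero j)⟩

theorem pv_F1_spec (sc : Int) :
    (pvF1 sc).Nodup ∧ ∀ q, q ∈ pvF1 sc ↔ pvCg (fun x1 => x1) (pvL1 sc) q := by
  refine pv_fill_spec _ _ _ 0 _ (pv_INV_zero _ _ (pv_L1_nodup sc) ?_) ?_
  · intro q hq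
    obtain ⟨k, h1, h2, rfl⟩ := pv_mem_L1.mp hq
    exact ⟨pvD k, pvY sc k, pvY sc k, hq, Or.inl rfl, rfl⟩
  · have hlen : (pvCL (fun x1 => x1) (pvL1 sc)).length ≤ (pvL1 sc).length * (sc.toNat + 1) := by
      refine pv_CL_len ?_
      intro p hp x y0 hpe
      obtain ⟨k, h1, h2, rfl⟩ := pv_mem_L1.mp hp
      obtain ⟨rfl, rfl⟩ : pvD k = x ∧ pvY sc k = y0 := by simpa using hpe
      have := pvD_bounds h1
      unfold pvY
      omega
    omega

theorem pv_F2_spec (sc : Int) :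
    (pvF2 sc).Nodup ∧ ∀ q, q ∈ pvF2 sc ↔ pvCg (fun x1 => -(x1 + 1)) (pvL2 sc) q := by
  refine pv_fill_spec _ _ _ 0 _ (pv_INV_zero _ _ (pv_L2_nodup sc) ?_) ?_
  · intro q hq
    obtain ⟨k, h1, h2, rfl⟩ := pv_mem_L2.mp hq
    exact ⟨-pvD k - 1, pvY sc k, pvY sc k, hq, Or.inl rfl, rfl⟩
  · have hlen : (pvCL (fun x1 => -(x1 + 1)) (pvL2 sc)).length ≤ (pvL2 sc).length * (sc.toNat + 1) := by
      refine pv_CL_len ?_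
      intro p hp x y0 hpe
      obtain ⟨k, h1, h2, rfl⟩ := pv_mem_L2.mp hp
      obtain ⟨rfl, rfl⟩ : -pvD k - 1 = x ∧ pvY sc k = y0 := by simpa using hpe
      have := pvD_bounds h1
      unfold pvY
      omega
    omega

theorem pv_Cg_L1_iff (sc : Int) (q : List Int) :
    pvCg (fun x1 => x1) (pvL1 sc) q ↔ ∃ k y, pvCond sc true k y ∧ q = [pvD k, y] := by
  constructor
  · rintro ⟨x, y0, y, hmem, hy, rfl⟩
    obtain ⟨k, h1, h2, he⟩ := pv_mem_L1.mp hmem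
    obtain ⟨rfl, rfl⟩ : x = pvD k ∧ y0 = pvY sc k := by simpa using he
    have hd := pvD_bounds h1
    refine ⟨k, y, ⟨h1, h2, fun _ => ?_, fun hf => (Bool.false_ne_true hf.symm).elim⟩, rfl⟩
    rcases hy with rfl | ⟨ha, hb⟩
    · unfold pvY at *; omega
    · have ha' : pvD k ≤ y := ha
      unfold pvY at *; omega
  · rintro ⟨k, y, ⟨h1, h2, hc, _⟩, rfl⟩
    obtain ⟨hc1, hc2⟩ := hc rfl
    refine ⟨pvD k, pvY sc k, y, pv_mem_L1.mpr ⟨k, h1, h2, rfl⟩, ?_, rfl⟩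
    rcases eq_or_lt_of_le hc2 with rfl | hlt
    · exact Or.inl rfl
    · exact Or.inr ⟨hc1, hlt⟩

theorem pv_Cg_L2_iff (sc : Int) (q : List Int) :
    pvCg (fun x1 => -(x1 + 1)) (pvL2 sc) q ↔ ∃ k y, pvCond sc true k y ∧ q = [-pvD k - 1, y] := by
  constructor
  · rintro ⟨x, y0, y, hmem, hy, rfl⟩
    obtain ⟨k, h1, h2, he⟩ := pv_mem_L2.mp hmem
    obtain ⟨rfl, rfl⟩ : x = -pvD k - 1 ∧ y0 = pvY sc k := by simpa using he
    have hd := pvD_bounds h1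
    refine ⟨k, y, ⟨h1, h2, fun _ => ?_, fun hf => (Bool.false_ne_true hf.symm).elim⟩, rfl⟩
    rcases hy with rfl | ⟨ha, hb⟩
    · unfold pvY at *; omega
    · have ha' : -(-pvD k - 1 + 1) ≤ y := ha
      unfold pvY at *; omega
  · rintro ⟨k, y, ⟨h1, h2, hc, _⟩, rfl⟩
    obtain ⟨hc1, hc2⟩ := hc rfl
    refine ⟨-pvD k - 1, pvY sc k, y, pv_mem_L2.mpr ⟨k, h1, h2, rfl⟩, ?_, rfl⟩
    rcases eq_or_lt_of_le hc2 with rfl | hlt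
    · exact Or.inl rfl
    · refine Or.inr ⟨?_, hlt⟩
      show -(-pvD k - 1 + 1) ≤ y
      omega

-- ---- A's combined pre-sort list ----

def pvPA (sc : Int) (filled : Bool) : List (List Int) :=
  (cond filled (pvF1 sc) (pvL1 sc)) ++ (cond filled (pvF2 sc) (pvL2 sc))

theorem pv_PA_left_mem (sc : Int) (filled : Bool) (q : List Int) :
    q ∈ (cond filled (pvF1 sc) (pvL1 sc)) ↔
      ∃ k y, pvCond sc filled k y ∧ q = [pvD k, y] := by
  cases filled
  · show q ∈ pvL1 sc ↔ _
    rw [pv_mem_L1]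
    unfold pvCond
    constructor
    · rintro ⟨k, h1, h2, rfl⟩
      exact ⟨k, pvY sc k, ⟨h1, h2, fun ht => (Bool.false_ne_true ht).elim, fun _ => rfl⟩, rfl⟩
    · rintro ⟨k, y, ⟨h1, h2, _, hc⟩, rfl⟩
      exact ⟨k, h1, h2, by rw [hc rfl]⟩
  · show q ∈ pvF1 sc ↔ _
    rw [(pv_F1_spec sc).2 q, pv_Cg_L1_iff]

theorem pv_PA_right_mem (sc : Int) (filled : Bool) (q : List Int) :
    q ∈ (cond filled (pvF2 sc) (pvL2 sc)) ↔
      ∃ k y, pvCond sc filled k y ∧ q = [-pvD k - 1, y] := by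
  cases filled
  · show q ∈ pvL2 sc ↔ _
    rw [pv_mem_L2]
    unfold pvCond
    constructor
    · rintro ⟨k, h1, h2, rfl⟩
      exact ⟨k, pvY sc k, ⟨h1, h2, fun ht => (Bool.false_ne_true ht).elim, fun _ => rfl⟩, rfl⟩
    · rintro ⟨k, y, ⟨h1, h2, _, hc⟩, rfl⟩
      exact ⟨k, h1, h2, by rw [hc rfl]⟩
  · show q ∈ pvF2 sc ↔ _
    rw [(pv_F2_spec sc).2 q, pv_Cg_L2_iff]

theorem pv_PA_mem (sc : Int) (filled : Bool) (q : List Int) :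
    q ∈ pvPA sc filled ↔
      ∃ k y, pvCond sc filled k y ∧ (q = [pvD k, y] ∨ q = [-pvD k - 1, y]) := by
  unfold pvPA
  rw [List.mem_append, pv_PA_left_mem, pv_PA_right_mem]
  constructor
  · rintro (⟨k, y, hc, rfl⟩ | ⟨k, y, hc, rfl⟩)
    · exact ⟨k, y, hc, Or.inl rfl⟩
    · exact ⟨k, y, hc, Or.inr rfl⟩
  · rintro ⟨k, y, hc, rfl | rfl⟩
    · exact Or.inl ⟨k, y, hc, rfl⟩
    · exact Or.inr ⟨k, y, hc, rfl⟩

theorem pv_PA_nodup (sc : Int) (filled : Bool) : (pvPA sc filled).Nodup := by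
  unfold pvPA
  rw [List.nodup_append]
  refine ⟨?_, ?_, ?_⟩
  · cases filled
    · exact pv_L1_nodup sc
    · exact (pv_F1_spec sc).1
  · cases filled
    · exact pv_L2_nodup sc
    · exact (pv_F2_spec sc).1
  · intro a ha b hb
    obtain ⟨k, y, hc, rfl⟩ := (pv_PA_left_mem sc filled a).mp ha
    obtain ⟨k', y', hc', rfl⟩ := (pv_PA_right_mem sc filled b).mp hb
    have h1 := (pvD_bounds hc.1).1
    have h2 := (pvD_bounds hc'.1).1
    intro he
    have : pvD k = -pvD k' - 1 := by simpa using (List.cons.injEq _ _ _ _ ▸ he).1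
    omega
-- ---- B's point set ----

def pvPB (sc : Int) (filled : Bool) : PySem.Set (Int × Int) :=
  (PySem.List.pyRange 1 (sc + 1)).foldl
    (fun s y_mod =>
      let x0 := PySem.Int.floordiv ((y_mod - 1) * 2) 3
      let y1 := (sc - y_mod) + x0
      if filled then
        (PySem.List.pyRange x0 (y1 + 1)).foldl
          (fun s y => (s.add (x0, y)).add (-x0 - 1, y)) s
      else
        (s.add (x0, y1)).add (-x0 - 1, y1))
    (PySem.Set.ofList [])

def pvBstepF (sc : Int) (s : PySem.Set (Int × Int)) (y_mod : Int) : PySem.Set (Int × Int) :=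
  let x0 := PySem.Int.floordiv ((y_mod - 1) * 2) 3
  let y1 := (sc - y_mod) + x0
  (s.add (x0, y1)).add (-x0 - 1, y1)

def pvBstepT (sc : Int) (s : PySem.Set (Int × Int)) (y_mod : Int) : PySem.Set (Int × Int) :=
  let x0 := PySem.Int.floordiv ((y_mod - 1) * 2) 3
  let y1 := (sc - y_mod) + x0
  (PySem.List.pyRange x0 (y1 + 1)).foldl
    (fun s y => (s.add (x0, y)).add (-x0 - 1, y)) s

theorem pv_PB_false_eq (sc : Int) :
    pvPB sc false = (PySem.List.pyRange 1 (sc + 1)).foldl (pvBstepF sc) (PySem.Set.ofList []) := rfl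

theorem pv_PB_true_eq (sc : Int) :
    pvPB sc true = (PySem.List.pyRange 1 (sc + 1)).foldl (pvBstepT sc) (PySem.Set.ofList []) := rfl

theorem pv_set_add_nodup (s : PySem.Set (Int × Int)) (x : Int × Int) (h : List.Nodup s) :
    List.Nodup (s.add x) := by
  unfold PySem.Set.add
  split_ifs with hc
  · exact h
  · rw [List.nodup_append]
    refine ⟨h, List.nodup_singleton _, ?_⟩
    intro a ha b hb
    rw [List.mem_singleton] at hb
    subst hb
    intro he
    subst he
    unfold PySem.Set.contains at hc
    rw [List.contains_eq_mem, decide_eq_true_iff] at hc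
    exact hc ha

theorem pv_set_mem_add (s : PySem.Set (Int × Int)) (x q : Int × Int) :
    q ∈ s.add x ↔ q ∈ s ∨ q = x := PySem.Set.mem_add s x q

theorem pv_B_inner_mem (x0 : Int) (ys : List Int) :
    ∀ (s : PySem.Set (Int × Int)) (q : Int × Int),
      q ∈ ys.foldl (fun s y => (s.add (x0, y)).add (-x0 - 1, y)) s
        ↔ q ∈ s ∨ ∃ y, y ∈ ys ∧ (q = (x0, y) ∨ q = (-x0 - 1, y)) := by
  induction ys with
  | nil => simp
  | cons y ys ih =>
    intro s q
    simp only [List.foldl_cons, ih, pv_set_mem_add, List.mem_cons]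
    constructor
    · rintro (((hq | rfl) | rfl) | ⟨y', hy', hq⟩)
      · exact Or.inl hq
      · exact Or.inr ⟨y, Or.inl rfl, Or.inl rfl⟩
      · exact Or.inr ⟨y, Or.inl rfl, Or.inr rfl⟩
      · exact Or.inr ⟨y', Or.inr hy', hq⟩
    · rintro (hq | ⟨y', hy', hq⟩)
      · exact Or.inl (Or.inl (Or.inl hq))
      · rcases hy' with rfl | hy'
        · rcases hq with rfl | rfl
          · exact Or.inl (Or.inl (Or.inr rfl))
          · exact Or.inl (Or.inr rfl)
        · exact Or.inr ⟨y', hy', hq⟩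

theorem pv_B_inner_nodup (x0 : Int) (ys : List Int) :
    ∀ s : PySem.Set (Int × Int), List.Nodup s →
      List.Nodup (ys.foldl (fun (s : PySem.Set (Int × Int)) y => (s.add (x0, y)).add (-x0 - 1, y)) s) := by
  induction ys with
  | nil => exact fun s h => h
  | cons y ys ih =>
    intro s h
    simp only [List.foldl_cons]
    exact ih _ (pv_set_add_nodup _ _ (pv_set_add_nodup _ _ h))

theorem pv_B_outer_mem_false (sc : Int) (ks : List Int) :
    (∀ k ∈ ks, 1 ≤ k) → ∀ (s : PySem.Set (Int × Int)) (q : Int × Int),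
      q ∈ ks.foldl (pvBstepF sc) s
        ↔ q ∈ s ∨ ∃ k, k ∈ ks ∧ (q = (pvD k, pvY sc k) ∨ q = (-pvD k - 1, pvY sc k)) := by
  induction ks with
  | nil => simp
  | cons k ks ih =>
    intro hks s q
    have hk1 : 1 ≤ k := hks k List.mem_cons_self
    have hstep : pvBstepF sc s k = (s.add (pvD k, pvY sc k)).add (-pvD k - 1, pvY sc k) := by
      unfold pvBstepF pvY
      rw [pvD_floordiv hk1]
    simp only [List.foldl_cons, hstep, ih (fun k' hk' => hks k' (List.mem_cons_of_mem _ hk')),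
      pv_set_mem_add, List.mem_cons]
    constructor
    · rintro (((hq | rfl) | rfl) | ⟨k', hk', hq⟩)
      · exact Or.inl hq
      · exact Or.inr ⟨k, Or.inl rfl, Or.inl rfl⟩
      · exact Or.inr ⟨k, Or.inl rfl, Or.inr rfl⟩
      · exact Or.inr ⟨k', Or.inr hk', hq⟩
    · rintro (hq | ⟨k', hk', hq⟩)
      · exact Or.inl (Or.inl (Or.inl hq))
      · rcases hk' with rfl | hk'
        · rcases hq with rfl | rfl
          · exact Or.inl (Or.inl (Or.inr rfl))
          · exact Or.inl (Or.inr rfl)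
        · exact Or.inr ⟨k', hk', hq⟩

theorem pv_B_outer_mem_true (sc : Int) (ks : List Int) :
    (∀ k ∈ ks, 1 ≤ k) → ∀ (s : PySem.Set (Int × Int)) (q : Int × Int),
      q ∈ ks.foldl (pvBstepT sc) s
        ↔ q ∈ s ∨ ∃ k y, k ∈ ks ∧ pvD k ≤ y ∧ y ≤ pvY sc k ∧
            (q = (pvD k, y) ∨ q = (-pvD k - 1, y)) := by
  induction ks with
  | nil => simp
  | cons k ks ih =>
    intro hks s q
    have hk1 : 1 ≤ k := hks k List.mem_cons_self
    have hstep : pvBstepT sc s k = (PySem.List.pyRange (pvD k) (pvY sc k + 1)).foldl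
        (fun (s : PySem.Set (Int × Int)) y => (s.add (pvD k, y)).add (-pvD k - 1, y)) s := by
      unfold pvBstepT pvY
      rw [pvD_floordiv hk1]
    simp only [List.foldl_cons, hstep, ih (fun k' hk' => hks k' (List.mem_cons_of_mem _ hk'))]
    rw [pv_B_inner_mem]
    simp only [PySem.List.mem_pyRange_one, List.mem_cons]
    constructor
    · rintro ((hq | ⟨y, ⟨hy1, hy2⟩, hq⟩) | ⟨k', y, hk', hy1, hy2, hq⟩)
      · exact Or.inl hq
      · exact Or.inr ⟨k, y, Or.inl rfl, hy1, by omega, hq⟩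
      · exact Or.inr ⟨k', y, Or.inr hk', hy1, hy2, hq⟩
    · rintro (hq | ⟨k', y, hk', hy1, hy2, hq⟩)
      · exact Or.inl (Or.inl hq)
      · rcases hk' with rfl | hk'
        · exact Or.inl (Or.inr ⟨y, ⟨hy1, by omega⟩, hq⟩)
        · exact Or.inr ⟨k', y, hk', hy1, hy2, hq⟩

theorem pv_PB_mem (sc : Int) (filled : Bool) (q : Int × Int) :
    q ∈ pvPB sc filled ↔
      ∃ k y, pvCond sc filled k y ∧ (q = (pvD k, y) ∨ q = (-pvD k - 1, y)) := by
  have hks : ∀ k ∈ PySem.List.pyRange 1 (sc + 1), 1 ≤ k := by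
    intro k hk
    rw [PySem.List.mem_pyRange_one] at hk
    omega
  have hbnd : ∀ k, k ∈ PySem.List.pyRange 1 (sc + 1) ↔ 1 ≤ k ∧ k ≤ sc := by
    intro k
    rw [PySem.List.mem_pyRange_one]
    omega
  have hempty : ∀ p : Int × Int, p ∈ PySem.Set.ofList ([] : List (Int × Int)) ↔ False := by
    intro p
    rw [PySem.Set.mem_ofList]
    simp
  cases filled
  · rw [pv_PB_false_eq, pv_B_outer_mem_false sc _ hks]
    unfold pvCond
    constructor
    · rintro (hq | ⟨k, hk, hq⟩)
      · exact ((hempty q).mp hq).elim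
      · exact ⟨k, pvY sc k, ⟨(hbnd k |>.mp hk).1, (hbnd k |>.mp hk).2,
          fun ht => (Bool.false_ne_true ht).elim, fun _ => rfl⟩, hq⟩
    · rintro ⟨k, y, ⟨h1, h2, _, hy⟩, hq⟩
      rw [hy rfl] at hq
      exact Or.inr ⟨k, (hbnd k).mpr ⟨h1, h2⟩, hq⟩
  · rw [pv_PB_true_eq, pv_B_outer_mem_true sc _ hks]
    unfold pvCond
    constructor
    · rintro (hq | ⟨k, y, hk, hy1, hy2, hq⟩)
      · exact ((hempty q).mp hq).elim
      · exact ⟨k, y, ⟨(hbnd k |>.mp hk).1, (hbnd k |>.mp hk).2,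
          fun _ => ⟨hy1, hy2⟩, fun hf => (Bool.false_ne_true hf.symm).elim⟩, hq⟩
    · rintro ⟨k, y, ⟨h1, h2, hy, _⟩, hq⟩
      exact Or.inr ⟨k, y, (hbnd k).mpr ⟨h1, h2⟩, (hy rfl).1, (hy rfl).2, hq⟩

theorem pv_PB_nodup (sc : Int) (filled : Bool) : List.Nodup (pvPB sc filled) := by
  cases filled
  · rw [pv_PB_false_eq]
    have : ∀ (ks : List Int) (s : PySem.Set (Int × Int)), List.Nodup s →
        List.Nodup (ks.foldl (pvBstepF sc) s) := by
      intro ks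
      induction ks with
      | nil => exact fun s h => h
      | cons k ks ih =>
        intro s h
        simp only [List.foldl_cons]
        exact ih _ (pv_set_add_nodup _ _ (pv_set_add_nodup _ _ h))
    exact this _ _ (PySem.Set.nodup_ofList [])
  · rw [pv_PB_true_eq]
    have : ∀ (ks : List Int) (s : PySem.Set (Int × Int)), List.Nodup s →
        List.Nodup (ks.foldl (pvBstepT sc) s) := by
      intro ks
      induction ks with
      | nil => exact fun s h => h
      | cons k ks ih =>
        intro s h
        simp only [List.foldl_cons]
        exact ih _ (pv_B_inner_nodup _ _ _ h)
    exact this _ _ (PySem.Set.nodup_ofList [])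
-- ---- stable-sort machinery: comparator congruence for insertion sort ----

theorem pv_insertBy_cons {α : Type} (b : α → α → Bool) (x y : α) (ys : List α) :
    PySem.List.insertBy b x (y :: ys) =
      if b x y then x :: y :: ys else y :: PySem.List.insertBy b x ys := rfl

theorem pv_insertBy_congr {α : Type} (b1 b2 : α → α → Bool) (x : α) :
    ∀ acc : List α, (∀ y ∈ acc, b1 x y = b2 x y) →
      PySem.List.insertBy b1 x acc = PySem.List.insertBy b2 x acc := by
  intro acc
  induction acc with
  | nil => intro _; rfl
  | cons y ys ih =>
    intro h
    rw [pv_insertBy_cons, pv_insertBy_cons, h y List.mem_cons_self,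
      ih (fun y' hy' => h y' (List.mem_cons_of_mem _ hy'))]

theorem pv_foldl_insertBy_congr {α : Type} (S : List α) (Q : α → α → Prop)
    (b1 b2 : α → α → Bool)
    (hb : ∀ x y, x ∈ S → y ∈ S → Q y x → b1 x y = b2 x y) :
    ∀ (M acc : List α), M.Pairwise Q → (∀ x ∈ M, ∀ y ∈ acc, Q y x) →
      (∀ x ∈ M, x ∈ S) → (∀ y ∈ acc, y ∈ S) →
      M.foldl (fun a x => PySem.List.insertBy b1 x a) acc
        = M.foldl (fun a x => PySem.List.insertBy b2 x a) acc := by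
  intro M
  induction M with
  | nil => intros; rfl
  | cons m M ih =>
    intro acc hpw hacc hMS haccS
    simp only [List.foldl_cons]
    rw [pv_insertBy_congr b1 b2 m acc
      (fun y hy => hb m y (hMS m List.mem_cons_self) (haccS y hy)
        (hacc m List.mem_cons_self y hy))]
    refine ih _ (List.Pairwise.of_cons hpw) ?_ ?_ ?_
    · intro x hx y hy
      rw [PySem.List.mem_insertBy] at hy
      rcases hy with rfl | hy
      · exact (List.pairwise_cons.mp hpw).1 x hx
      · exact hacc x (List.mem_cons_of_mem _ hx) y hy
    · exact fun x hx => hMS x (List.mem_cons_of_mem _ hx)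
    · intro y hy
      rw [PySem.List.mem_insertBy] at hy
      rcases hy with rfl | hy
      · exact hMS y List.mem_cons_self
      · exact haccS y hy

-- the combined key that realises "sort by x, then stably by y descending"
def pvKL (C : Int) (q : List Int) : Int :=
  PySem.List.pyGetD q 0 0 - C * PySem.List.pyGetD q 1 0
def pvKP (C : Int) (p : Int × Int) : Int := p.1 - C * p.2

theorem pv_master (bnd : Int) (hbnd : 0 ≤ bnd) (P : List (List Int)) (pts : List (Int × Int))
    (hshape : ∀ q ∈ P, ∃ a b, q = [a, b] ∧ -bnd ≤ a ∧ a ≤ bnd)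
    (hbp : ∀ p ∈ pts, -bnd ≤ p.1 ∧ p.1 ≤ bnd)
    (hndP : P.Nodup) (hndpts : pts.Nodup)
    (hmem : ∀ a b : Int, [a, b] ∈ P ↔ (a, b) ∈ pts) :
    PySem.List.sorted (PySem.List.sorted P (fun i => PySem.List.pyGetD i 0 0) false)
        (fun i => PySem.List.pyGetD i 1 0) true
      = (PySem.List.sorted2 pts (fun p => -p.2) (fun p => p.1) false).map
          (fun p => [p.1, p.2]) := by
  set C : Int := 2 * bnd + 2 with hC
  set f : Int × Int → List Int := fun p => [p.1, p.2] with hf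
  set Rp : List (Int × Int) := PySem.List.sorted pts (pvKP C) false with hRp
  have hRp_perm : Rp.Perm pts := PySem.List.sorted_perm pts (pvKP C) false
  have hRp_nodup : Rp.Nodup := hRp_perm.nodup_iff.mpr hndpts
  have hRp_strict : Rp.Pairwise (fun a b => pvKP C a < pvKP C b) := by
    have h1 : Rp.Pairwise (fun a b => pvKP C a ≤ pvKP C b) :=
      PySem.List.sorted_pairwise pts (pvKP C)
    refine (h1.and hRp_nodup).imp_of_mem ?_
    intro a b ha hb hab
    obtain ⟨hle, hne⟩ := hab
    have hA := hbp a (hRp_perm.subset ha)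
    have hB := hbp b (hRp_perm.subset hb)
    rcases lt_or_eq_of_le hle with h | h
    · exact h
    · exfalso
      unfold pvKP at h
      have h2eq : a.2 = b.2 := by nlinarith [h, hA.1, hA.2, hB.1, hB.2]
      have h1eq : a.1 = b.1 := by rw [h2eq] at h; omega
      exact hne (Prod.ext h1eq h2eq)
  -- B's single lexicographic sort equals the sort by the combined key
  have hBsort : PySem.List.sorted2 pts (fun p => -p.2) (fun p => p.1) false = Rp := by
    have e1 : PySem.List.sorted2 pts (fun p => -p.2) (fun p => p.1) false
        = pts.foldl (fun acc x => PySem.List.insertBy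
            (fun a b => decide ((-a.2 : Int) < -b.2) ||
              (!decide ((-b.2 : Int) < -a.2) && decide (a.1 < b.1))) x acc) [] := rfl
    have e2 : Rp = pts.foldl (fun acc x => PySem.List.insertBy
        (fun a b => decide (pvKP C a < pvKP C b)) x acc) [] :=
      PySem.List.sorted_eq_foldl_insertBy pts (pvKP C)
    rw [e1, e2]
    refine pv_foldl_insertBy_congr pts (fun _ _ => True) _ _ ?_ pts []
      (hndpts.imp_of_mem (fun _ _ _ => trivial)) (by simp) (fun x hx => hx) (by simp)
    intro x y hx hy _
    have hX := hbp x hx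
    have hY := hbp y hy
    unfold pvKP
    by_cases h1 : (-x.2 : Int) < -y.2
    · have : x.1 - C * x.2 < y.1 - C * y.2 := by nlinarith
      simp [h1, this]
    · by_cases h2 : (-y.2 : Int) < -x.2
      · have : ¬ (x.1 - C * x.2 < y.1 - C * y.2) := by nlinarith
        simp [h1, h2, this]
      · have he : x.2 = y.2 := by omega
        have : (x.1 - C * x.2 < y.1 - C * y.2) ↔ x.1 < y.1 := by rw [he]; constructor <;> intro <;> omega
        by_cases h3 : x.1 < y.1 <;> simp [h1, h2, h3, this]
  -- A's two stable sorts equal the sort by the combined key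
  set M : List (List Int) := PySem.List.sorted P (fun i => PySem.List.pyGetD i 0 0) false with hM
  have hM_perm : M.Perm P := PySem.List.sorted_perm P _ false
  have hM_nodup : M.Nodup := hM_perm.nodup_iff.mpr hndP
  have hM_pw : M.Pairwise (fun a b =>
      PySem.List.pyGetD a 0 0 ≤ PySem.List.pyGetD b 0 0) :=
    PySem.List.sorted_pairwise P _
  have hAsort : PySem.List.sorted M (fun i => PySem.List.pyGetD i 1 0) true
      = PySem.List.sorted M (pvKL C) false := by
    have e1 := PySem.List.sorted_rev_eq_foldl_insertBy M (fun i => PySem.List.pyGetD i 1 0)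
    have e2 := PySem.List.sorted_eq_foldl_insertBy M (pvKL C)
    rw [e1, e2]
    refine pv_foldl_insertBy_congr P
      (fun a b => PySem.List.pyGetD a 0 0 ≤ PySem.List.pyGetD b 0 0 ∧ a ≠ b) _ _ ?_ M []
      (hM_pw.and hM_nodup) (by simp) (fun x hx => hM_perm.subset hx) (by simp)
    intro x y hx hy hQ
    obtain ⟨hxy, hne⟩ := hQ
    obtain ⟨a, b, rfl, ha1, ha2⟩ := hshape x hx
    obtain ⟨c, d, rfl, hc1, hc2⟩ := hshape y hy
    have hkx : PySem.List.pyGetD ([c, d] : List Int) 0 0 ≤ PySem.List.pyGetD ([a, b] : List Int) 0 0 := hxy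
    have hca : c ≤ a := hkx
    unfold pvKL
    show (decide (PySem.List.pyGetD ([c, d] : List Int) 1 0 < PySem.List.pyGetD ([a, b] : List Int) 1 0)) =
      decide (PySem.List.pyGetD ([a, b] : List Int) 0 0 - C * PySem.List.pyGetD ([a, b] : List Int) 1 0
        < PySem.List.pyGetD ([c, d] : List Int) 0 0 - C * PySem.List.pyGetD ([c, d] : List Int) 1 0)
    show (decide (d < b)) = decide (a - C * b < c - C * d)
    rcases lt_trichotomy d b with h | h | h
    · have : a - C * b < c - C * d := by nlinarith
      simp [h, this]
    · subst h
      have hac : c < a := by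
        rcases lt_or_eq_of_le hca with h' | h'
        · exact h'
        · exact absurd (by rw [h']) (Ne.symm hne)
      have : ¬ (a - C * d < c - C * d) := by omega
      simp [this]
    · have : ¬ (a - C * b < c - C * d) := by nlinarith
      simp [not_lt_of_gt h, this]
  -- the common right-hand side
  have hf_inj : Function.Injective f := by
    intro p q hpq
    simp only [hf, List.cons.injEq, and_true] at hpq
    exact Prod.ext hpq.1 hpq.2
  have hmapperm : (pts.map f).Perm P := by
    rw [List.perm_ext_iff_of_nodup (hndpts.map hf_inj) hndP]
    intro q
    rw [List.mem_map]
    constructor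
    · rintro ⟨p, hp, rfl⟩
      exact (hmem p.1 p.2).mpr hp
    · intro hq
      obtain ⟨a, b, rfl, _, _⟩ := hshape q hq
      exact ⟨(a, b), (hmem a b).mp hq, rfl⟩
  have hfinal : PySem.List.sorted M (pvKL C) false = Rp.map f := by
    refine PySem.List.sorted_eq_of_perm_of_pairwise_lt M (Rp.map f) (pvKL C) ?_ ?_
    · exact ((hRp_perm.map f).trans hmapperm).trans hM_perm.symm
    · rw [List.pairwise_map]
      refine hRp_strict.imp ?_
      intro a b h
      exact h
  rw [hAsort, hfinal, hBsort]
-- ---- connecting the ports to the named lists ----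

theorem pv_B_eq (spell_rng : Int) (filled : Bool) :
    get_quarter_circle_sweep_tilted_alt spell_rng filled
      = (PySem.List.sorted2 (pvPB (PySem.Int.floordiv spell_rng 5) filled)
          (fun p => -p.2) (fun p => p.1) false).map (fun p => [p.1, p.2]) := rfl

theorem pv_A_eq (spell_rng : Int) (filled : Bool) :
    get_quarter_circle_sweep_tilted spell_rng filled
      = PySem.List.sorted
          (PySem.List.sorted (pvPA (PySem.Int.floordiv spell_rng 5) filled)
            (fun i => PySem.List.pyGetD i 0 0) false)
          (fun i => PySem.List.pyGetD i 1 0) true := by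
  cases filled <;>
    · simp only [get_quarter_circle_sweep_tilted]
      rw [pv_loopA1, pv_loopA2]
      rfl

theorem pv_mem_iff (sc : Int) (filled : Bool) (a b : Int) :
    [a, b] ∈ pvPA sc filled ↔ (a, b) ∈ pvPB sc filled := by
  rw [pv_PA_mem, pv_PB_mem]
  constructor
  · rintro ⟨k, y, hc, hq | hq⟩
    · obtain ⟨rfl, rfl⟩ : a = pvD k ∧ b = y := by simpa using hq
      exact ⟨k, b, hc, Or.inl rfl⟩
    · obtain ⟨rfl, rfl⟩ : a = -pvD k - 1 ∧ b = y := by simpa using hq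
      exact ⟨k, b, hc, Or.inr rfl⟩
  · rintro ⟨k, y, hc, hq | hq⟩
    · obtain ⟨rfl, rfl⟩ : a = pvD k ∧ b = y := by
        simpa [Prod.ext_iff] using hq
      exact ⟨k, b, hc, Or.inl rfl⟩
    · obtain ⟨rfl, rfl⟩ : a = -pvD k - 1 ∧ b = y := by
        simpa [Prod.ext_iff] using hq
      exact ⟨k, b, hc, Or.inr rfl⟩

theorem pv_main (sc : Int) (filled : Bool) :
    PySem.List.sorted
        (PySem.List.sorted (pvPA sc filled) (fun i => PySem.List.pyGetD i 0 0) false)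
        (fun i => PySem.List.pyGetD i 1 0) true
      = (PySem.List.sorted2 (pvPB sc filled) (fun p => -p.2) (fun p => p.1) false).map
          (fun p => [p.1, p.2]) := by
  by_cases hsc : sc ≤ 0
  · refine pv_master 1 (by norm_num) _ _ ?_ ?_
      (pv_PA_nodup sc filled) (pv_PB_nodup sc filled) (pv_mem_iff sc filled)
    · intro q hq
      rw [pv_PA_mem] at hq
      obtain ⟨k, y, ⟨h1, h2, _, _⟩, hq⟩ := hq
      exact absurd (h1.trans h2) (by omega)
    · intro p hp
      rw [pv_PB_mem] at hp
      obtain ⟨k, y, ⟨h1, h2, _, _⟩, hp⟩ := hp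
      exact absurd (h1.trans h2) (by omega)
  · have hsc2 : 0 < sc := by omega
    refine pv_master (sc + 1) (by omega) _ _ ?_ ?_
      (pv_PA_nodup sc filled) (pv_PB_nodup sc filled) (pv_mem_iff sc filled)
    · intro q hq
      rw [pv_PA_mem] at hq
      obtain ⟨k, y, ⟨h1, h2, _, _⟩, hq⟩ := hq
      have hd := pvD_bounds h1
      rcases hq with rfl | rfl
      · exact ⟨pvD k, y, rfl, by omega, by omega⟩
      · exact ⟨-pvD k - 1, y, rfl, by omega, by omega⟩
    · intro p hp
      rw [pv_PB_mem] at hp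
      obtain ⟨k, y, ⟨h1, h2, _, _⟩, hp⟩ := hp
      have hd := pvD_bounds h1
      rcases hp with rfl | rfl
      · constructor <;> simp <;> omega
      · constructor <;> simp <;> omega

theorem get_quarter_circle_sweep_tilted_spec' (spell_rng : Int) (filled : Bool) :
    get_quarter_circle_sweep_tilted spell_rng filled
      = get_quarter_circle_sweep_tilted_alt spell_rng filled := by
  rw [pv_A_eq, pv_B_eq, pv_main]

-- ===== VERDICT (by name: the statement is the Claim_ definition above) =====
theorem get_quarter_circle_sweep_tilted_spec : Claim_equal_get_quarter_circle_sweep_tilted := by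
  intro spell_rng filled _
  unfold Spec_get_quarter_circle_sweep_tilted
  exact get_quarter_circle_sweep_tilted_spec' spell_rng filled
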